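-- pv_equiv track=rewrite | github.com/Mactto/Algorithm | baekjoon/4659_비밀번호발음하기.py | check_continuous_twice
-- ===== SOURCE A (Python) =====
-- def check_continuous_twice(word: str):
--     if len(word) < 2:
--         return True
--     for i in range(len(word) - 1):
--         if word[i] == word[i + 1]:
--             if word[i] == 'e' or word[i] == 'o':
--                 continue
--             return False
--     return True
-- ===== SOURCE B (Python) =====
-- import re
--
-- _BAD_DOUBLE = re.compile(r'([^eo])\1')
--
-- def check_continuous_twice(word: str):
--     return _BAD_DOUBLE.search(word) is None
-- ===== Notes on version B (the rewrite author's own statement) =====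
-- stated objective: idiomatic
-- what changed: Replaced the explicit index loop over adjacent pairs with a regex search for a backreferenced non-'e'/'o' doubled character (([^eo])\1), returning whether no match exists.
import Mathlib
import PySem

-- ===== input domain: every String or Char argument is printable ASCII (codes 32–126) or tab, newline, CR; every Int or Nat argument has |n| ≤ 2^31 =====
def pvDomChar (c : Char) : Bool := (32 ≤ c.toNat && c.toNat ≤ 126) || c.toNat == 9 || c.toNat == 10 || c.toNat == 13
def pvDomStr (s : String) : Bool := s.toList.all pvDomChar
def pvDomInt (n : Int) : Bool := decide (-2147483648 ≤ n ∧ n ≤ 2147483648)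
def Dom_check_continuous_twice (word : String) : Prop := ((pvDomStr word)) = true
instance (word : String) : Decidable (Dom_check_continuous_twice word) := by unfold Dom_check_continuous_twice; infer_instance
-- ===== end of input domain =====

-- B replaces A's index loop (early return False) by a regex search for r'([^eo])\1' and returns whether no match exists (idiomatic, same cost).

-- ===== PORT A =====
-- the 'for i in range(len(word)-1)' loop with early 'return False'
def pvLoopA (cs : List Char) : List Int → Bool
  | [] => true
  | i :: rest =>
    match PySem.List.pyGet? cs i, PySem.List.pyGet? cs (i + 1) with
    | some a, some b =>
      if a = b then
        if a = 'e' ∨ a = 'o' then pvLoopA cs rest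
        else false
      else pvLoopA cs rest
    | _, _ => true  -- unreachable: every index from range(len-1) is in bounds (Python would raise)

def check_continuous_twice (word : String) : Bool :=
  let cs := word.toList
  if (cs.length : Int) < 2 then true
  else pvLoopA cs (PySem.List.pyRange 0 ((cs.length : Int) - 1) 1)

-- ===== PORT B =====
-- re.search(r'([^eo])\1', word): at each start position try to match the pattern
-- (a character that is not 'e'/'o', then a backreference to it); on failure slide one
-- position right. True = a match exists somewhere.
def pvReSearchBad : List Char → Bool
  | [] => false
  | [_] => false
  | a :: b :: rest =>
    if (a ≠ 'e' ∧ a ≠ 'o') ∧ b = a then true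
    else pvReSearchBad (b :: rest)

-- '…search(word) is None'
def check_continuous_twice_alt (word : String) : Bool :=
  !(pvReSearchBad word.toList)

-- ===== PRECONDITION & SPEC =====
def Spec_check_continuous_twice (word : String) (out : Bool) : Prop := out = check_continuous_twice_alt word
instance (word : String) (out : Bool) : Decidable (Spec_check_continuous_twice word out) := by unfold Spec_check_continuous_twice; infer_instance

-- ===== CLAIM (what is proved, stated in full; the proofs are below) =====
def Claim_equal_check_continuous_twice : Prop := ∀ (word : String), Dom_check_continuous_twice word → Spec_check_continuous_twice word (check_continuous_twice word)

-- ===== LEMMAS AND PROOFS =====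

-- the loop over a list of in-bounds indices is True iff every index passes the pair test
theorem pvLoopA_iff (cs : List Char) (l : List Int)
    (h : ∀ i ∈ l, 0 ≤ i ∧ i + 1 < (cs.length : Int)) :
    pvLoopA cs l = true ↔
      ∀ i ∈ l, ∀ a b, PySem.List.pyGet? cs i = some a → PySem.List.pyGet? cs (i + 1) = some b →
        (a ≠ b ∨ a = 'e' ∨ a = 'o') := by
  induction l with
  | nil => simp [pvLoopA]
  | cons i rest ih =>
    obtain ⟨h0, h1⟩ := h i (List.mem_cons_self ..)
    have ha : PySem.List.pyGet? cs i = some cs[i.toNat] :=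
      PySem.List.pyGet?_eq_some_getElem cs h0 (by omega)
    have hb : PySem.List.pyGet? cs (i + 1) = some cs[(i+1).toNat] :=
      PySem.List.pyGet?_eq_some_getElem cs (by omega) h1
    have ih' := ih (fun j hj => h j (List.mem_cons_of_mem _ hj))
    have hstep : pvLoopA cs (i :: rest) = true ↔
        ((cs[i.toNat] ≠ cs[(i+1).toNat] ∨ cs[i.toNat] = 'e' ∨ cs[i.toNat] = 'o') ∧
          pvLoopA cs rest = true) := by
      simp only [pvLoopA, ha, hb]
      by_cases heq : cs[i.toNat] = cs[(i+1).toNat]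
      · by_cases heo : cs[i.toNat] = 'e' ∨ cs[i.toNat] = 'o'
        · simp [heq]
        · simp [heq]
      · simp [heq]
    rw [hstep, ih']
    constructor
    · rintro ⟨hh, ht⟩ j hj a b hja hjb
      rcases List.mem_cons.mp hj with rfl | hj'
      · rw [ha] at hja; rw [hb] at hjb
        cases hja; cases hjb; exact hh
      · exact ht j hj' a b hja hjb
    · intro hall
      exact ⟨hall i (List.mem_cons_self ..) _ _ ha hb,
        fun j hj a b hja hjb => hall j (List.mem_cons_of_mem _ hj) a b hja hjb⟩

-- the regex search finds no match iff every adjacent pair passes the test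
theorem search_false_iff (cs : List Char) :
    pvReSearchBad cs = false ↔
      ∀ (k : ℕ) (hk : k + 1 < cs.length),
        (cs[k]'(by omega) ≠ cs[k+1]'(by omega) ∨ cs[k]'(by omega) = 'e' ∨ cs[k]'(by omega) = 'o') := by
  induction cs with
  | nil => simp [pvReSearchBad]
  | cons a t ih =>
    cases t with
    | nil => simp [pvReSearchBad]
    | cons b rest =>
      have hstep : pvReSearchBad (a :: b :: rest) = false ↔
          ((a ≠ b ∨ a = 'e' ∨ a = 'o') ∧ pvReSearchBad (b :: rest) = false) := by
        simp only [pvReSearchBad]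
        by_cases hm : (a ≠ 'e' ∧ a ≠ 'o') ∧ b = a
        · simp [hm]
        · simp [hm]
          intro _
          by_cases hab : a = b
          · subst hab; tauto
          · tauto
      rw [hstep, ih]
      constructor
      · rintro ⟨hh, ht⟩ k hk
        match k with
        | 0 => simpa using hh
        | k + 1 =>
          have hk' : k + 1 < (b :: rest).length := by
            simpa using Nat.lt_of_succ_lt_succ hk
          simpa using ht k hk'
      · intro h
        refine ⟨by simpa using h 0 (by simp), fun k hk => ?_⟩
        have := h (k + 1) (by simpa using Nat.succ_lt_succ hk)
        simpa using this

-- ===== VERDICT (by name: the statement is the Claim_ definition above) =====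
theorem check_continuous_twice_spec : Claim_equal_check_continuous_twice := by
  intro word _
  unfold Spec_check_continuous_twice check_continuous_twice check_continuous_twice_alt
  set cs := word.toList with hcs
  by_cases hlen : (cs.length : Int) < 2
  · -- short word: no match possible, both sides True
    have : cs.length < 2 := by exact_mod_cast hlen
    interval_cases h : cs.length
    · simp [List.length_eq_zero_iff.mp h, pvReSearchBad]
    · obtain ⟨a, ha⟩ := List.length_eq_one_iff.mp h
      simp [ha, pvReSearchBad]
  · simp only [if_neg hlen]
    have H : pvLoopA cs (PySem.List.pyRange 0 ((cs.length : Int) - 1) 1) = true ↔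
        pvReSearchBad cs = false := by
      rw [pvLoopA_iff cs _ (fun i hi => by
        have := (PySem.List.mem_pyRange_one).mp hi
        exact ⟨this.1, by omega⟩)]
      rw [search_false_iff]
      constructor
      · intro h k hk
        have hik : (k : Int) ∈ PySem.List.pyRange 0 ((cs.length : Int) - 1) 1 := by
          rw [PySem.List.mem_pyRange_one]; constructor <;> [positivity; omega]
        have ha : PySem.List.pyGet? cs (k : Int) = some (cs[k]'(by omega)) := by
          rw [PySem.List.pyGet?_natCast, List.getElem?_eq_getElem (by omega)]
        have hb : PySem.List.pyGet? cs ((k : Int) + 1) = some (cs[k+1]'(by omega)) := by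
          have hcast : (k : Int) + 1 = ((k + 1 : ℕ) : Int) := by push_cast; ring
          rw [hcast, PySem.List.pyGet?_natCast, List.getElem?_eq_getElem (by omega)]
        exact h _ hik _ _ ha hb
      · intro h i hi a b hia hib
        have hib' := (PySem.List.mem_pyRange_one).mp hi
        obtain ⟨h0, h1⟩ := hib'
        set k := i.toNat with hkk
        have hik : i = (k : Int) := by omega
        have hk1 : k + 1 < cs.length := by omega
        have ha : a = cs[k]'(by omega) := by
          rw [hik, PySem.List.pyGet?_natCast, List.getElem?_eq_getElem (by omega)] at hia
          exact (Option.some.inj hia).symm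
        have hb : b = cs[k+1]'(by omega) := by
          rw [hik] at hib
          have hcast : (k : Int) + 1 = ((k + 1 : ℕ) : Int) := by push_cast; ring
          rw [hcast, PySem.List.pyGet?_natCast, List.getElem?_eq_getElem (by omega)] at hib
          exact (Option.some.inj hib).symm
        subst ha; subst hb
        exact h k hk1
    cases hB : pvReSearchBad cs
    · simp [H.mpr hB]
    · have hL : pvLoopA cs (PySem.List.pyRange 0 ((cs.length : Int) - 1) 1) ≠ true := by
        intro hL; rw [H] at hL; rw [hB] at hL; cases hL
      simp [Bool.eq_false_iff.mpr hL]
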